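-- pv_equiv track=rewrite | github.com/Hegmon/smart-locker-hardware | app/streaming_agent/camera_detector.py | _preferred_capture_format
-- ===== SOURCE A (Python) =====
-- from typing import NamedTuple, Optional, List
--
-- def _preferred_capture_format(formats: List[str]) -> Optional[str]:
--     """
--     Select preferred capture format from supported formats.
--     Returns None if no known format is found - FFmpeg will use auto-detection.
--     """
--     if not formats:
--         # Empty format list is OK - FFmpeg can auto-detect
--         return None
--
--     fmt_lower = [f.lower() for f in formats]
--     if "mjpeg" in fmt_lower or "mjpg" in fmt_lower:
--         return "mjpeg"
--     if "yuyv" in fmt_lower or "yuyv422" in fmt_lower or "yuv422" in fmt_lower: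
--         return "yuyv422"
--     if "h264" in fmt_lower:
--         return "h264"
--     return None
-- ===== SOURCE B (Python) =====
-- from typing import Optional, List
--
-- def _preferred_capture_format(formats: List[str]) -> Optional[str]:
--     # Single pass: fold a minimum priority rank over the list, then decode it.
--     best = 3
--     for f in formats:
--         g = f.lower()
--         if g in ("mjpeg", "mjpg"):
--             r = 0
--         elif g in ("yuyv", "yuyv422", "yuv422"):
--             r = 1
--         elif g == "h264":
--             r = 2
--         else:
--             r = 3
--         if r < best:
--             best = r
--     return {0: "mjpeg", 1: "yuyv422", 2: "h264"}.get(best)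
-- ===== Notes on version B (the rewrite author's own statement) =====
-- stated objective: alternative
-- what changed: Instead of A's staged membership tests (up to six scans of the lowercased list), B makes one pass folding a minimum priority rank per element and decodes the final rank through a rank->name table.
import Mathlib
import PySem

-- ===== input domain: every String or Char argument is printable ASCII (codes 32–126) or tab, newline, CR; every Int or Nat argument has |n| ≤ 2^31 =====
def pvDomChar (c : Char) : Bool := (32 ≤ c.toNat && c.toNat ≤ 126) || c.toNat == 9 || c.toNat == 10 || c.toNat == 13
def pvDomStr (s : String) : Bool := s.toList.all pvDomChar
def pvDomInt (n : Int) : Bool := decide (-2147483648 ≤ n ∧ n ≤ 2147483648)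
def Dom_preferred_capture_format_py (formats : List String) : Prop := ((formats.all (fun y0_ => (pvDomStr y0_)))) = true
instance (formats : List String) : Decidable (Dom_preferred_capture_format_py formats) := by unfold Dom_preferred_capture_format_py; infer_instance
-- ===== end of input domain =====

-- B folds one minimum-priority-rank pass over the list and decodes it, instead of A's staged membership tests (alternative decomposition; return value only).
-- ===== PORT A =====
def preferred_capture_format_py (formats : List String) : Option String :=
  if formats = [] then none
  else
    let fmt_lower := formats.map PySem.Str.lower
    if fmt_lower.contains "mjpeg" || fmt_lower.contains "mjpg" then some "mjpeg"
    else if fmt_lower.contains "yuyv" || fmt_lower.contains "yuyv422" || fmt_lower.contains "yuv422" then some "yuyv422"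
    else if fmt_lower.contains "h264" then some "h264"
    else none

-- ===== PORT B =====
-- priority rank of one lowercased format name
def pvRank (g : String) : Nat :=
  if g = "mjpeg" ∨ g = "mjpg" then 0
  else if g = "yuyv" ∨ g = "yuyv422" ∨ g = "yuv422" then 1
  else if g = "h264" then 2
  else 3

-- the for-loop of Source B: fold the minimum rank over the list
def pvBestLoop : List String → Nat → Nat
  | [], best => best
  | f :: t, best =>
      let r := pvRank (PySem.Str.lower f)
      pvBestLoop t (if r < best then r else best)

def preferred_capture_format_py_alt (formats : List String) : Option String :=
  PySem.Dict.get? (PySem.Dict.ofList [((0 : Nat), "mjpeg"), (1, "yuyv422"), (2, "h264")])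
    (pvBestLoop formats 3)

-- ===== PRECONDITION & SPEC =====
def Spec_preferred_capture_format_py (formats : List String) (out : Option String) : Prop := out = preferred_capture_format_py_alt formats
instance (formats : List String) (out : Option String) : Decidable (Spec_preferred_capture_format_py formats out) := by unfold Spec_preferred_capture_format_py; infer_instance

-- ===== CLAIM (what is proved, stated in full; the proofs are below) =====
def Claim_equal_preferred_capture_format_py : Prop := ∀ (formats : List String), Dom_preferred_capture_format_py formats → Spec_preferred_capture_format_py formats (preferred_capture_format_py formats)

-- ===== LEMMAS AND PROOFS =====
theorem pvRank_le (g : String) : pvRank g ≤ 3 := by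
  unfold pvRank; split_ifs <;> omega

theorem pvIfMin (r b : Nat) : (if r < b then r else b) = min r b := by
  split_ifs <;> omega

-- the loop computes min acc (loop l 3), for acc ≤ 3
theorem pvBestLoop_acc (l : List String) : ∀ b, b ≤ 3 → pvBestLoop l b = min b (pvBestLoop l 3) := by
  induction l with
  | nil => intro b hb; simp [pvBestLoop]; omega
  | cons f t ih =>
    intro b hb
    have hr := pvRank_le (PySem.Str.lower f)
    simp only [pvBestLoop, pvIfMin, Nat.min_eq_left hr]
    rw [ih _ (by omega), ih _ hr]
    omega

-- the fold result is A's if-chain value in rank form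
theorem pvBestLoop_charac (l : List String) :
    pvBestLoop l 3 =
      (if (l.map PySem.Str.lower).contains "mjpeg" || (l.map PySem.Str.lower).contains "mjpg" then 0
       else if (l.map PySem.Str.lower).contains "yuyv" || (l.map PySem.Str.lower).contains "yuyv422"
              || (l.map PySem.Str.lower).contains "yuv422" then 1
       else if (l.map PySem.Str.lower).contains "h264" then 2
       else 3) := by
  induction l with
  | nil => simp [pvBestLoop]
  | cons f t ih =>
    have hr := pvRank_le (PySem.Str.lower f)
    simp only [pvBestLoop, pvIfMin, Nat.min_eq_left hr]
    rw [pvBestLoop_acc t _ hr, ih]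
    simp only [List.map_cons, List.contains_cons]
    generalize (List.map PySem.Str.lower t).contains "mjpeg" = c1
    generalize (List.map PySem.Str.lower t).contains "mjpg" = c2
    generalize (List.map PySem.Str.lower t).contains "yuyv" = c3
    generalize (List.map PySem.Str.lower t).contains "yuyv422" = c4
    generalize (List.map PySem.Str.lower t).contains "yuv422" = c5
    generalize (List.map PySem.Str.lower t).contains "h264" = c6
    by_cases h0 : PySem.Str.lower f = "mjpeg" ∨ PySem.Str.lower f = "mjpg"
    · have hv : pvRank (PySem.Str.lower f) = 0 := by unfold pvRank; exact if_pos h0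
      rcases h0 with h | h <;> rw [hv, h] <;> revert c1 c2 c3 c4 c5 c6 <;> decide
    · by_cases h1 : PySem.Str.lower f = "yuyv" ∨ PySem.Str.lower f = "yuyv422" ∨ PySem.Str.lower f = "yuv422"
      · have hv : pvRank (PySem.Str.lower f) = 1 := by unfold pvRank; rw [if_neg h0, if_pos h1]
        rcases h1 with h | h | h <;> rw [hv] <;> simp only [h] <;>
          revert c1 c2 c3 c4 c5 c6 <;> decide
      · by_cases h2 : PySem.Str.lower f = "h264"
        · have hv : pvRank (PySem.Str.lower f) = 2 := by
            unfold pvRank; rw [if_neg h0, if_neg h1, if_pos h2]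
          rw [hv, h2]
          revert c1 c2 c3 c4 c5 c6; decide
        · have hv : pvRank (PySem.Str.lower f) = 3 := by
            unfold pvRank; rw [if_neg h0, if_neg h1, if_neg h2]
          have e1 : ("mjpeg" == PySem.Str.lower f) = false := beq_eq_false_iff_ne.mpr (fun hh => h0 (Or.inl hh.symm))
          have e2 : ("mjpg" == PySem.Str.lower f) = false := beq_eq_false_iff_ne.mpr (fun hh => h0 (Or.inr hh.symm))
          have e3 : ("yuyv" == PySem.Str.lower f) = false := beq_eq_false_iff_ne.mpr (fun hh => h1 (Or.inl hh.symm))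
          have e4 : ("yuyv422" == PySem.Str.lower f) = false := beq_eq_false_iff_ne.mpr (fun hh => h1 (Or.inr (Or.inl hh.symm)))
          have e5 : ("yuv422" == PySem.Str.lower f) = false := beq_eq_false_iff_ne.mpr (fun hh => h1 (Or.inr (Or.inr hh.symm)))
          have e6 : ("h264" == PySem.Str.lower f) = false := beq_eq_false_iff_ne.mpr (fun hh => h2 hh.symm)
          rw [hv]
          simp only [e1, e2, e3, e4, e5, e6]
          revert c1 c2 c3 c4 c5 c6; decide

-- ===== VERDICT (by name: the statement is the Claim_ definition above) =====
theorem preferred_capture_format_py_spec : Claim_equal_preferred_capture_format_py := by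
  intro formats _
  unfold Spec_preferred_capture_format_py preferred_capture_format_py preferred_capture_format_py_alt
  rw [pvBestLoop_charac]
  cases formats with
  | nil => decide
  | cons f t =>
    simp only [reduceCtorEq, if_false]
    split_ifs <;> decide
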